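-- pv_equiv track=rewrite | github.com/theislab/LODE | feature_statistics/utils/statistics_utils.py | get_seg_independents_str
-- ===== SOURCE A (Python) =====
-- from copy import deepcopy
--
-- def get_seg_independents_str(seg_features, seg_delta, seg_times):
--     seg_dependents = []
--
--     for seg_feature in seg_features:
--         for time in seg_times:
--             seg_dependents.append(f"{seg_feature}_{time}")
--
--         if seg_delta:
--             # add all delta columns
--             for k, s_time in enumerate(seg_times[:-1]):
--
--                 remaining_times = deepcopy(seg_times)
--                 remaining_times.remove(s_time)
--
--                 for r_time in remaining_times[k:]:
--                     if f"{r_time}-{s_time}" in seg_delta: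
--                         seg_dependents.append(f"{seg_feature}_{r_time}_delta_{s_time}")
--
--     return seg_dependents
-- ===== SOURCE B (Python) =====
-- def get_seg_independents_str(seg_features, seg_delta, seg_times):
--     # Table-then-traverse: the (r_time, s_time) delta pairs are feature-independent.
--     # For s_time = seg_times[k], its first occurrence is at index <= k, so A's
--     # "remove first occurrence then take [k:]" is exactly seg_times[k+1:].
--     deltas = set(seg_delta)
--     pairs = [(r, s)
--              for k, s in enumerate(seg_times[:-1])
--              for r in seg_times[k + 1:]
--              if f"{r}-{s}" in deltas]
--     return [name
--             for f in seg_features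
--             for name in [f"{f}_{t}" for t in seg_times]
--                         + [f"{f}_{r}_delta_{s}" for r, s in pairs]]
-- ===== Notes on version B (the rewrite author's own statement) =====
-- stated objective: alternative
-- what changed: B builds the feature-independent (r_time, s_time) delta-pair table once by scanning seg_times[k+1:] directly (A's remove-first-occurrence-then-[k:] always equals seg_times[k+1:] since the first occurrence of seg_times[k] is at index <= k) with a set for delta membership, then emits all names as comprehensions in one pass over seg_features, instead of A's per-feature re-run of the enumerate/deepcopy/remove/slice search with repeated list membership tests.
import Mathlib
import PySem

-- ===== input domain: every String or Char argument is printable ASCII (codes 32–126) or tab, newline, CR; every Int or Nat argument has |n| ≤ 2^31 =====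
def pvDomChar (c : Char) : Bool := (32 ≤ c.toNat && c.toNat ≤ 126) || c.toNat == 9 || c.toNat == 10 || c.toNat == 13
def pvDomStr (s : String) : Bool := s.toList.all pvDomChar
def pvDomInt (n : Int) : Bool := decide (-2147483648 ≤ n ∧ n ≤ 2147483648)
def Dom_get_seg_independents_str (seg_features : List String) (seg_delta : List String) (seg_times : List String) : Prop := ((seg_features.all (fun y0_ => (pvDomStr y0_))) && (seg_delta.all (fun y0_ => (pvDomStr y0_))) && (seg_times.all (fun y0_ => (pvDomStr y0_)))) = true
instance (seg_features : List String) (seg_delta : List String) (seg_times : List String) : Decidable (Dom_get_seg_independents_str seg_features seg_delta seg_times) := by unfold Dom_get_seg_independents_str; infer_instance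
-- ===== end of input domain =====

-- B builds the feature-independent delta-pair table once (scanning seg_times[k+1:] directly,
-- a set for delta membership) and emits all names as comprehensions in one pass over features.
-- ===== PORT A =====
def get_seg_independents_str (seg_features : List String) (seg_delta : List String) (seg_times : List String) : List String :=
  seg_features.foldl (fun acc seg_feature =>
    let acc := seg_times.foldl (fun a time => a ++ [seg_feature ++ "_" ++ time]) acc
    if seg_delta.isEmpty then acc
    else
      (PySem.List.enumerate (PySem.List.slice seg_times none (some (-1)))).foldl
        (fun a ks =>
          -- remaining_times = deepcopy(seg_times); remaining_times.remove(s_time)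
          -- (the .getD [] default is unreachable: ks.2 ∈ seg_times, so remove? succeeds)
          let remaining := (PySem.List.remove? seg_times ks.2).getD []
          (PySem.List.slice remaining (some ks.1) none).foldl
            (fun a r =>
              if seg_delta.contains (r ++ "-" ++ ks.2) then
                a ++ [seg_feature ++ "_" ++ r ++ "_delta_" ++ ks.2]
              else a) a)
        acc) []

-- ===== PORT B =====
def get_seg_independents_str_alt (seg_features : List String) (seg_delta : List String) (seg_times : List String) : List String :=
  let deltas : PySem.Set String := PySem.Set.ofList seg_delta
  let pairs : List (String × String) :=
    (PySem.List.enumerate (PySem.List.slice seg_times none (some (-1)))).flatMap (fun ks =>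
      ((PySem.List.slice seg_times (some (ks.1 + 1)) none).filter
        (fun r => PySem.Set.contains deltas (r ++ "-" ++ ks.2))).map (fun r => (r, ks.2)))
  seg_features.flatMap (fun f =>
    seg_times.map (fun t => f ++ "_" ++ t) ++
    pairs.map (fun rs => f ++ "_" ++ rs.1 ++ "_delta_" ++ rs.2))

-- ===== PRECONDITION & SPEC =====
def Spec_get_seg_independents_str (seg_features : List String) (seg_delta : List String) (seg_times : List String) (out : List String) : Prop := out = get_seg_independents_str_alt seg_features seg_delta seg_times
instance (seg_features : List String) (seg_delta : List String) (seg_times : List String) (out : List String) : Decidable (Spec_get_seg_independents_str seg_features seg_delta seg_times out) := by unfold Spec_get_seg_independents_str; infer_instance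

-- ===== CLAIM (what is proved, stated in full; the proofs are below) =====
def Claim_equal_get_seg_independents_str : Prop := ∀ (seg_features : List String) (seg_delta : List String) (seg_times : List String), Dom_get_seg_independents_str seg_features seg_delta seg_times → Spec_get_seg_independents_str seg_features seg_delta seg_times (get_seg_independents_str seg_features seg_delta seg_times)

-- ===== LEMMAS AND PROOFS =====

-- the delta-pair table, with plain list membership (B's set membership reduces to it)
def pvPairs (sd st : List String) : List (String × String) :=
  (PySem.List.enumerate (PySem.List.slice st none (some (-1)))).flatMap (fun ks =>
    ((PySem.List.slice st (some (ks.1 + 1)) none).filter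
      (fun r => sd.contains (r ++ "-" ++ ks.2))).map (fun r => (r, ks.2)))

-- remove-first-occurrence-then-drop-k equals drop (k+1): the first occurrence of st[k] is at index <= k
theorem erase_getElem_drop (st : List String) (k : Nat) (h : k < st.length) :
    (st.erase st[k]).drop k = st.drop (k + 1) := by
  induction st generalizing k with
  | nil => simp at h
  | cons x xs ih =>
    cases k with
    | zero => simp
    | succ k =>
      have hk : k < xs.length := by simpa using h
      by_cases hx : x = xs[k]
      · simp [hx]
      · simp [hx, ih k hk]

-- the per-(k, s_time) candidate list A scans equals seg_times[k+1:]
theorem remaining_slice_eq (st : List String) (k : Nat) (h : k < st.length) :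
    PySem.List.slice ((PySem.List.remove? st st[k]).getD []) (some (k : Int)) none
      = PySem.List.slice st (some ((k : Int) + 1)) none := by
  rw [PySem.List.remove?_eq_some_erase st st[k] (st.getElem_mem h)]
  have hcast : ((k : Int) + 1) = ((k + 1 : Nat) : Int) := by push_cast; ring
  rw [hcast, PySem.List.slice_from_natCast, PySem.List.slice_from_natCast, Option.getD_some,
    erase_getElem_drop st k h]

-- A's whole delta block for one feature appends exactly the names of the pair table
theorem deltaA_eq (sd st : List String) (f : String) (acc : List String) :
    (PySem.List.enumerate (PySem.List.slice st none (some (-1)))).foldl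
      (fun a ks =>
        (PySem.List.slice ((PySem.List.remove? st ks.2).getD []) (some ks.1) none).foldl
          (fun a r =>
            if sd.contains (r ++ "-" ++ ks.2) then
              a ++ [f ++ "_" ++ r ++ "_delta_" ++ ks.2]
            else a) a) acc
    = acc ++ (pvPairs sd st).map (fun rs => f ++ "_" ++ rs.1 ++ "_delta_" ++ rs.2) := by
  rw [PySem.List.foldl_congr_mem _ _
      (fun a ks => a ++ ((PySem.List.slice st (some (ks.1 + 1)) none).filter
        (fun r => sd.contains (r ++ "-" ++ ks.2))).map
          (fun r => f ++ "_" ++ r ++ "_delta_" ++ ks.2)) acc ?_]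
  · rw [PySem.List.foldl_append_eq_flatMap]
    unfold pvPairs
    simp [List.map_flatMap, Function.comp_def]
  · intro a ks hks
    rw [PySem.List.slice_to_neg_one] at hks
    rcases (PySem.List.mem_enumerate_iff _ _ _).1 hks with ⟨k, hk, rfl⟩
    have hk' : k < st.length := lt_of_lt_of_le hk (by simp [List.length_dropLast])
    have hget : st.dropLast[k] = st[k]'hk' := List.getElem_dropLast hk
    simp only [zero_add, hget]
    rw [remaining_slice_eq st k hk', PySem.List.foldl_append_if]

-- ===== VERDICT (by name: the statement is the Claim_ definition above) =====
theorem get_seg_independents_str_spec : Claim_equal_get_seg_independents_str := by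
  intro sf sd st _
  unfold Spec_get_seg_independents_str get_seg_independents_str get_seg_independents_str_alt
  dsimp only
  rw [PySem.List.foldl_congr_mem sf _
      (fun acc f => acc ++ (st.map (fun t => f ++ "_" ++ t) ++
        (pvPairs sd st).map (fun rs => f ++ "_" ++ rs.1 ++ "_delta_" ++ rs.2))) [] ?_]
  · rw [PySem.List.foldl_append_eq_flatMap]
    simp [pvPairs]
  · intro acc f _
    by_cases hsd : sd.isEmpty
    · have hnil : sd = [] := List.isEmpty_iff.1 hsd
      subst hnil
      simp only [hsd, if_true]
      rw [PySem.List.foldl_append_singleton_eq_map]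
      simp [pvPairs]
    · simp only [Bool.not_eq_true] at hsd
      simp only [hsd, Bool.false_eq_true, if_false]
      rw [PySem.List.foldl_append_singleton_eq_map, deltaA_eq]
      simp [List.append_assoc]
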